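-- pv_equiv track=rewrite | github.com/losskatsu/codility | Dominator_01.py | solution
-- ===== SOURCE A (Python) =====
-- def solution(A):
--     # write your code in Python 3.6
--     N = len(A)
--     half = N/2
--
--     ## solve by using dictionary
--     dic = {}
--     for ele in A:
--         dic[ele] = []
--
--     for i in range(0, N):
--         for key in dic.keys():
--             if(A[i]==key):
--                 dic[key].append(i)
--                 if(len(dic[key])>half):
--                     return i
--
--     return -1
-- ===== SOURCE B (Python) =====
-- def solution(A):
--     n = len(A)
--     counts = {}
--     for i, x in enumerate(A):
--         c = counts.get(x, 0) + 1
--         counts[x] = c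
--         if 2 * c > n:
--             return i
--     return -1
-- ===== Notes on version B (the rewrite author's own statement) =====
-- stated objective: faster
-- what changed: Replaced the pre-built index-list dictionary and the inner scan over all distinct keys at every position by a single pass that maintains one running counter per value and returns as soon as a count exceeds len(A)/2.
import Mathlib
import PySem

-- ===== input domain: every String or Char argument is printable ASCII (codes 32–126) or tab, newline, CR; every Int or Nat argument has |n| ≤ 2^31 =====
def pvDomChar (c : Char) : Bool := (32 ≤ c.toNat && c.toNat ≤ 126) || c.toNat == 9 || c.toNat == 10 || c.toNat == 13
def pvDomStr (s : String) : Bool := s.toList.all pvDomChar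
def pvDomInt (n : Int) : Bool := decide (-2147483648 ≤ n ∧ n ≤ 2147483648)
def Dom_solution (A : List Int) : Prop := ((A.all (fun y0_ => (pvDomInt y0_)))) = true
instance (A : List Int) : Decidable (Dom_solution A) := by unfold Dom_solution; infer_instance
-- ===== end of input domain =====

-- B replaces A's inner scan over all distinct keys (with per-key index lists) by one
-- counting pass; a timing run measures the asymptotic speed-up.

-- ===== PORT A =====
-- inner loop 'for key in dic.keys(): if A[i]==key: dic[key].append(i); if len(dic[key])>half: return i'
-- ('len(...) > N/2' on ints is exactly '2*len(...) > N'; the keys come from dic so dic[key] is present,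
--  transliterated with getD [] which only ever sees present keys here)
def solInner (ai : Int) (i N : Int) : List Int → PySem.Dict Int (List Int) →
    PySem.Dict Int (List Int) × Option Int
  | [], d => (d, none)
  | k :: ks, d =>
    if ai = k then
      let lst := d.getD k [] ++ [i]
      let d' := d.insert k lst
      if 2 * (lst.length : Int) > N then (d', some i) else solInner ai i N ks d'
    else solInner ai i N ks d

-- outer loop 'for i in range(0, N)'; 'A[i]' is in range for every i of the range, ported with getD 0
def solOuter (A : List Int) (N : Int) : List Int → PySem.Dict Int (List Int) → Int
  | [], _ => -1
  | i :: is, d =>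
    let ai := PySem.List.pyGetD A i 0
    match solInner ai i N d.keys d with
    | (_, some r) => r
    | (d', none) => solOuter A N is d'

def solution (A : List Int) : Int :=
  let N : Int := A.length
  let dic : PySem.Dict Int (List Int) := A.foldl (fun d ele => d.insert ele []) PySem.Dict.empty
  solOuter A N (PySem.List.pyRange 0 N 1) dic

-- ===== PORT B =====
def altLoop (n : Int) : List (Int × Int) → PySem.Dict Int Int → Int
  | [], _ => -1
  | (i, x) :: rest, counts =>
    let c := counts.getD x 0 + 1
    let counts' := counts.insert x c
    if 2 * c > n then i else altLoop n rest counts'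

def solution_alt (A : List Int) : Int :=
  altLoop (A.length) (PySem.List.enumerate A) PySem.Dict.empty

-- ===== PRECONDITION & SPEC =====
def Spec_solution (A : List Int) (out : Int) : Prop := out = solution_alt A
instance (A : List Int) (out : Int) : Decidable (Spec_solution A out) := by unfold Spec_solution; infer_instance

-- ===== CLAIM (what is proved, stated in full; the proofs are below) =====
def Claim_equal_solution : Prop := ∀ (A : List Int), Dom_solution A → Spec_solution A (solution A)

-- ===== LEMMAS AND PROOFS =====

theorem solInner_not_mem (ai i N : Int) (ks : List Int) (d : PySem.Dict Int (List Int))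
    (h : ai ∉ ks) : solInner ai i N ks d = (d, none) := by
  induction ks generalizing d with
  | nil => rfl
  | cons k ks ih =>
    simp only [List.mem_cons, not_or] at h
    simp only [solInner, if_neg h.1]
    exact ih _ h.2

theorem solInner_mem (ai i N : Int) : ∀ (ks : List Int), ks.Nodup → ai ∈ ks →
    ∀ (d : PySem.Dict Int (List Int)),
    solInner ai i N ks d =
      (d.insert ai (d.getD ai [] ++ [i]),
        if 2 * ((d.getD ai []).length + 1 : Int) > N then some i else none) := by
  intro ks
  induction ks with
  | nil => intro _ h; cases h
  | cons k ks ih =>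
    intro hnd h d
    rcases List.nodup_cons.mp hnd with ⟨hk, hnd'⟩
    by_cases hak : ai = k
    · subst hak
      have hl : (((d.getD ai [] ++ [i]).length : Int)) = ((d.getD ai []).length + 1 : Int) := by
        simp
      simp only [solInner, hl]
      by_cases hc : 2 * ((d.getD ai []).length + 1 : Int) > N
      · simp [hc]
      · simp [hc, solInner_not_mem ai i N ks _ hk]
    · have h2 := List.mem_cons.mp h
      rcases h2 with h2 | h2
      · exact absurd h2 hak
      · simp only [solInner, if_neg hak]
        exact ih hnd' h2 d

-- the initial dict maps everything to [] under getD []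
theorem getD_init (l : List Int) (d : PySem.Dict Int (List Int))
    (h : ∀ x, d.getD x [] = []) (x : Int) :
    (l.foldl (fun d ele => d.insert ele []) d).getD x [] = [] := by
  induction l generalizing d with
  | nil => exact h x
  | cons e l ih =>
    refine ih _ (fun y => ?_)
    rw [PySem.Dict.getD_insert]
    split <;> simp [h]

theorem loop_eq (A : List Int) (j : Nat) (hj : j ≤ A.length)
    (d : PySem.Dict Int (List Int)) (cnt : PySem.Dict Int Int)
    (hkeys : ∀ x ∈ A, x ∈ d.keys) (hnd : d.keys.Nodup)
    (hlen : ∀ x, ((d.getD x []).length : Int) = cnt.getD x 0) :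
    solOuter A (A.length) (PySem.List.pyRange j (A.length) 1) d =
      altLoop (A.length) (PySem.List.enumerate (A.drop j) j) cnt := by
  induction hn : A.length - j generalizing j d cnt with
  | zero =>
    have hj' : j = A.length := by omega
    subst hj'
    rw [PySem.List.pyRange_one_eq_nil (by omega), List.drop_length]
    rfl
  | succ n ih =>
    have hjlt : j < A.length := by omega
    have hcons : PySem.List.pyRange (j : Int) (A.length) 1
        = (j : Int) :: PySem.List.pyRange ((j : Int) + 1) (A.length) 1 := by
      exact PySem.List.pyRange_one_cons (by exact_mod_cast hjlt)
    have hdrop : A.drop j = A[j] :: A.drop (j + 1) := List.drop_eq_getElem_cons hjlt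
    rw [hcons, hdrop, PySem.List.enumerate_cons]
    simp only [solOuter, altLoop]
    have hai : PySem.List.pyGetD A (j : Int) 0 = A[j] := by
      simp [PySem.List.pyGetD_natCast, List.getD_eq_getElem?_getD,
        List.getElem?_eq_getElem hjlt]
    rw [hai]
    rw [solInner_mem _ _ _ _ hnd (hkeys _ (List.getElem_mem hjlt))]
    have hc : ((d.getD A[j] []).length + 1 : Int) = cnt.getD A[j] 0 + 1 := by
      rw [hlen]
    rw [hc]
    by_cases hcond : 2 * (cnt.getD A[j] 0 + 1) > (A.length : Int)
    · simp [hcond]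
    · simp only [if_neg hcond]
      have h1 : ((j : Int) + 1) = ((j + 1 : Nat) : Int) := by push_cast; ring
      rw [h1]
      refine ih (j + 1) (by omega) _ _ ?_ ?_ ?_ (by omega)
      · intro x hx
        rw [PySem.Dict.keys_insert_of_contains]
        · exact hkeys x hx
        · exact (PySem.Dict.contains_iff_mem_keys _ _).mpr (hkeys _ (List.getElem_mem hjlt))
      · exact PySem.Dict.nodup_keys_insert _ _ _ hnd
      · intro x
        rw [PySem.Dict.getD_insert, PySem.Dict.getD_insert]
        split
        · simp [hlen]
        · exact hlen x

-- ===== VERDICT (by name: the statement is the Claim_ definition above) =====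
theorem solution_spec : Claim_equal_solution := by
  intro A _
  unfold Spec_solution solution solution_alt
  have h1 : ∀ x ∈ A,
      x ∈ (A.foldl (fun d ele => d.insert ele []) PySem.Dict.empty :
        PySem.Dict Int (List Int)).keys := by
    intro x hx
    rw [PySem.Dict.keys_foldl_insert]
    simp [PySem.Set.mem_update, hx]
  have h2 : (A.foldl (fun d ele => d.insert ele []) PySem.Dict.empty :
      PySem.Dict Int (List Int)).keys.Nodup :=
    PySem.Dict.nodup_keys_foldl_insert _ _ _ PySem.Dict.nodup_keys_empty
  have h3 : ∀ x : Int,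
      ((((A.foldl (fun d ele => d.insert ele []) PySem.Dict.empty :
        PySem.Dict Int (List Int))).getD x []).length : Int)
        = (PySem.Dict.empty : PySem.Dict Int Int).getD x 0 := by
    intro x
    rw [getD_init A PySem.Dict.empty (fun y => by simp [PySem.Dict.getD_empty])]
    simp [PySem.Dict.getD_empty]
  have h := loop_eq A 0 (Nat.zero_le _) _ PySem.Dict.empty h1 h2 h3
  simpa using h
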